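-- pv_equiv track=rewrite | github.com/jih19984/SSAFY_14th | personal_algorithm/swea4530_extreme_cleaning_work.py | count_with4_upto
-- ===== SOURCE A (Python) =====
-- def count_with4_upto(N: int) -> int:
--     """0 ~ N 사이 '4가 포함된 수' 개수를 정확히 계산 (직접 캐시 버전)"""
--     if N < 0:
--         return 0
--     s = str(N)
--     cache = {}  # 직접 캐시(메모이제이션) 딕셔너리
--
--     def dp(pos: int, tight: bool, has4: bool) -> int:
--         key = (pos, tight, has4)
--         if key in cache:
--             return cache[key]
--
--         if pos == len(s):
--             return 1 if has4 else 0
--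
--         limit = int(s[pos]) if tight else 9
--         total = 0
--         for d in range(0, limit + 1):
--             ntight = tight and (d == limit)
--             nhas4 = has4 or (d == 4)
--             total += dp(pos + 1, ntight, nhas4)
--
--         cache[key] = total
--         return total
--
--     return dp(0, True, False)
-- ===== SOURCE B (Python) =====
-- def count_with4_upto(N: int) -> int:
--     """Complementary counting: (N+1) minus the number of 4-free integers in [0, N]."""
--     if N < 0:
--         return 0
--     s = str(N)
--     L = len(s)
--     free = 0
--     hit4 = False
--     for i in range(L):
--         c = int(s[i])
--         cnt = c if c <= 4 else c - 1   # digits d in [0, c-1] with d != 4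
--         free += cnt * 9 ** (L - 1 - i)
--         if c == 4:
--             hit4 = True
--             break
--     if not hit4:
--         free += 1                      # N itself is 4-free
--     return N + 1 - free
-- ===== Notes on version B (the rewrite author's own statement) =====
-- stated objective: simpler
-- what changed: Replaces the memoized digit-DP recursion with a single closed-form combinatorial pass: count 4-free numbers in [0,N] by one left-to-right walk over the digits (cnt*9^remaining per position, stop at a 4, +1 if none) and return (N+1) minus that.
import Mathlib
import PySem

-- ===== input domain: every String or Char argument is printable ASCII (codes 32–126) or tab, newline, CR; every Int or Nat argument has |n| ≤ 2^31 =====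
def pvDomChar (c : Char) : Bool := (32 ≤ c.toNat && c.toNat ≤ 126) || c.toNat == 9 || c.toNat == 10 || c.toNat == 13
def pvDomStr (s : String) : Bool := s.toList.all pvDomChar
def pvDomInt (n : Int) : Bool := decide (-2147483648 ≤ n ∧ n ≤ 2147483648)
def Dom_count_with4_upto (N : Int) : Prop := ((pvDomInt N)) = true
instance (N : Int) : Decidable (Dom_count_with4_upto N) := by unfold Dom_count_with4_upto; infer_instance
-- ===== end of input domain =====

-- B replaces A's memoized digit-DP recursion by a single closed-form combinatorial pass
-- (complementary counting of 4-free numbers); same return value, proved below.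

-- ===== PORT A =====
-- int(s[pos]) in A; exact on in-range digit positions, the only ones A's dp reaches (else Python would raise)
def pvCharIntA (s : List Char) (pos : Int) : Int :=
  match PySem.List.pyGet? s pos with
  | some c => (PySem.Int.ofChars? [c]).getD 0
  | none => 0

-- dp(pos, tight, has4) with the explicit memo dict; fuel bounds the recursion depth
-- (fuel = len(s) at the initial call, strictly more than the remaining depth at every recursive call)
def dpA (s : List Char) (fuel : Nat) (pos : Int) (tight has4 : Bool)
    (cache : PySem.Dict (Int × Bool × Bool) Int) :
    Int × PySem.Dict (Int × Bool × Bool) Int :=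
  match PySem.Dict.get? cache (pos, tight, has4) with
  | some v => (v, cache)
  | none =>
    if pos = (s.length : Int) then ((if has4 then 1 else 0), cache)
    else
      match fuel with
      | 0 => (0, cache)  -- never reached from count_with4_upto
      | fuel' + 1 =>
        let limit : Int := if tight then pvCharIntA s pos else 9
        let r := (PySem.List.pyRange 0 (limit + 1) 1).foldl
          (fun (st : Int × PySem.Dict (Int × Bool × Bool) Int) d =>
            let q := dpA s fuel' (pos + 1) (tight && decide (d = limit))
                       (has4 || decide (d = 4)) st.2
            (st.1 + q.1, q.2))
          (0, cache)
        (r.1, PySem.Dict.insert r.2 (pos, tight, has4) r.1)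

def count_with4_upto (N : Int) : Int :=
  if N < 0 then 0
  else
    let s := (PySem.Int.toStr N).toList
    (dpA s s.length 0 true false PySem.Dict.empty).1

-- ===== PORT B =====
-- int(ch) in B; exact on digit characters, the only ones B reaches
def pvCharIntB (c : Char) : Int := (PySem.Int.ofChars? [c]).getD 0

-- the left-to-right pass of Source B: cnt * 9^(remaining) per digit, stop at a 4, +1 if none
def freeB : List Char → Int
  | [] => 1
  | c :: rest =>
    let cv := pvCharIntB c
    (if cv ≤ 4 then cv else cv - 1) * 9 ^ rest.length +
      (if cv = 4 then 0 else freeB rest)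

def count_with4_upto_alt (N : Int) : Int :=
  if N < 0 then 0
  else N + 1 - freeB (PySem.Int.toStr N).toList

-- ===== PRECONDITION & SPEC =====
def Spec_count_with4_upto (N : Int) (out : Int) : Prop := out = count_with4_upto_alt N
instance (N : Int) (out : Int) : Decidable (Spec_count_with4_upto N out) := by unfold Spec_count_with4_upto; infer_instance

-- ===== CLAIM (what is proved, stated in full; the proofs are below) =====
def Claim_equal_count_with4_upto : Prop := ∀ (N : Int), Dom_count_with4_upto N → Spec_count_with4_upto N (count_with4_upto N)

-- ===== LEMMAS AND PROOFS =====

-- cache-free value of A's dp, structurally on the remaining digit characters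
def dpPure : List Char → Bool → Bool → Int
  | [], _, h => if h then 1 else 0
  | c :: rest, t, h =>
    ((PySem.List.pyRange 0 ((if t then pvCharIntB c else 9) + 1) 1).map
      (fun d => dpPure rest (t && decide (d = (if t then pvCharIntB c else 9)))
                  (h || decide (d = 4)))).sum

-- numeric value of a digit string
def valS (s : List Char) : Int := s.foldl (fun a c => 10 * a + pvCharIntB c) 0

-- every cache entry records the cache-free dp value of its key
def GoodC (s : List Char) (cache : PySem.Dict (Int × Bool × Bool) Int) : Prop :=
  ∀ (p : Int) (t h : Bool) (v : Int),
    PySem.Dict.get? cache (p, t, h) = some v → v = dpPure (s.drop p.toNat) t h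

-- all characters are decimal digits
def AllDig (s : List Char) : Prop := ∀ c ∈ s, 0 ≤ pvCharIntB c ∧ pvCharIntB c ≤ 9

lemma pvCharIntA_eq (s : List Char) (p : Int) (h0 : 0 ≤ p) (hl : p < (s.length : Int)) :
    pvCharIntA s p = pvCharIntB (s[p.toNat]'(by omega)) := by
  unfold pvCharIntA
  rw [PySem.List.pyGet?_eq_some_getElem s h0 hl]
  rfl

lemma dpA_loop (s : List Char) (fuel' : Nat) (pnext : Int) (tb hb : Int → Bool)
    (f : Int × PySem.Dict (Int × Bool × Bool) Int → Int → Int × PySem.Dict (Int × Bool × Bool) Int)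
    (hf : ∀ st d, f st d = (st.1 + (dpA s fuel' pnext (tb d) (hb d) st.2).1,
                            (dpA s fuel' pnext (tb d) (hb d) st.2).2))
    (HIH : ∀ (t h : Bool) cache, GoodC s cache →
      (dpA s fuel' pnext t h cache).1 = dpPure (s.drop pnext.toNat) t h ∧
      GoodC s (dpA s fuel' pnext t h cache).2) :
    ∀ (L : List Int) (acc : Int) cache, GoodC s cache →
      (L.foldl f (acc, cache)).1
        = acc + (L.map (fun d => dpPure (s.drop pnext.toNat) (tb d) (hb d))).sum ∧
      GoodC s (L.foldl f (acc, cache)).2 := by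
  intro L
  induction L with
  | nil => intro acc cache hg; simpa using hg
  | cons d L ih =>
    intro acc cache hg
    obtain ⟨hv, hgq⟩ := HIH (tb d) (hb d) cache hg
    obtain ⟨h1, h2⟩ := ih (acc + (dpA s fuel' pnext (tb d) (hb d) cache).1)
      (dpA s fuel' pnext (tb d) (hb d) cache).2 hgq
    simp only [List.foldl_cons, hf, List.map_cons, List.sum_cons]
    refine ⟨?_, h2⟩
    rw [h1, hv]
    ring

lemma dpA_correct (s : List Char) (fuel : Nat) :
    ∀ (p : Int) (t h : Bool) cache, GoodC s cache → 0 ≤ p → p ≤ (s.length : Int) →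
      s.length ≤ fuel + p.toNat →
      (dpA s fuel p t h cache).1 = dpPure (s.drop p.toNat) t h ∧
      GoodC s (dpA s fuel p t h cache).2 := by
  induction fuel with
  | zero =>
    intro p t h cache hg h0 hpl hfl
    have hp : p = (s.length : Int) := by omega
    rw [dpA]
    cases hCk : PySem.Dict.get? cache (p, t, h) with
    | some v =>
      simp only
      exact ⟨hg p t h v hCk, hg⟩
    | none =>
      have hdrop : s.drop p.toNat = [] := by
        apply List.drop_eq_nil_of_le; omega
      simp [hp, hdrop, dpPure]
      exact hg
  | succ fuel' ih =>
    intro p t h cache hg h0 hpl hfl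
    rw [dpA]
    cases hCk : PySem.Dict.get? cache (p, t, h) with
    | some v =>
      simp only
      exact ⟨hg p t h v hCk, hg⟩
    | none =>
      by_cases hp : p = (s.length : Int)
      · have hdrop : s.drop p.toNat = [] := by
          apply List.drop_eq_nil_of_le; omega
        simp [hp, hdrop, dpPure]
        exact hg
      · have hplt : p < (s.length : Int) := lt_of_le_of_ne hpl hp
        rw [if_neg hp]
        dsimp only
        have HIH : ∀ (t h : Bool) cache, GoodC s cache →
            (dpA s fuel' (p + 1) t h cache).1 = dpPure (s.drop (p + 1).toNat) t h ∧
            GoodC s (dpA s fuel' (p + 1) t h cache).2 := by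
          intro t' h' c' hg'
          exact ih (p + 1) t' h' c' hg' (by omega) (by omega) (by omega)
        obtain ⟨hL, hG⟩ := dpA_loop s fuel' (p + 1)
          (fun d => t && decide (d = (if t then pvCharIntA s p else 9)))
          (fun d => h || decide (d = 4))
          (fun st d =>
            (st.1 + (dpA s fuel' (p + 1)
                (t && decide (d = (if t then pvCharIntA s p else 9)))
                (h || decide (d = 4)) st.2).1,
             (dpA s fuel' (p + 1)
                (t && decide (d = (if t then pvCharIntA s p else 9)))
                (h || decide (d = 4)) st.2).2))
          (fun st d => rfl) HIH
          (PySem.List.pyRange 0 ((if t then pvCharIntA s p else 9) + 1) 1) 0 cache hg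
        have hval :
            ((PySem.List.pyRange 0 ((if t then pvCharIntA s p else 9) + 1) 1).foldl
              (fun st d =>
                (st.1 + (dpA s fuel' (p + 1)
                    (t && decide (d = (if t then pvCharIntA s p else 9)))
                    (h || decide (d = 4)) st.2).1,
                 (dpA s fuel' (p + 1)
                    (t && decide (d = (if t then pvCharIntA s p else 9)))
                    (h || decide (d = 4)) st.2).2))
              (0, cache)).1 = dpPure (s.drop p.toNat) t h := by
          rw [hL]
          have hcons : s.drop p.toNat = s[p.toNat]'(by omega) :: s.drop (p.toNat + 1) :=
            (List.getElem_cons_drop (by omega)).symm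
          rw [hcons]
          simp only [dpPure]
          rw [← pvCharIntA_eq s p h0 hplt]
          have hpn : (p + 1).toNat = p.toNat + 1 := by omega
          rw [hpn]
          simp
        refine ⟨hval, ?_⟩
        intro p' t' h' v hv
        rw [PySem.Dict.get?_insert] at hv
        by_cases hk : ((p', t', h') : Int × Bool × Bool) = (p, t, h)
        · rw [if_pos hk] at hv
          simp only [Prod.mk.injEq] at hk
          obtain ⟨rfl, rfl, rfl⟩ := hk
          cases hv
          exact hval
        · rw [if_neg hk] at hv
          exact hG p' t' h' v hv

lemma valS_seed (s : List Char) : ∀ a : Int,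
    s.foldl (fun a c => 10 * a + pvCharIntB c) a = a * 10 ^ s.length + valS s := by
  induction s with
  | nil => intro a; simp [valS]
  | cons c rest ih =>
    intro a
    rw [List.foldl_cons, ih (10 * a + pvCharIntB c)]
    have h2 : valS (c :: rest) = (10 * 0 + pvCharIntB c) * 10 ^ rest.length + valS rest := by
      unfold valS
      rw [List.foldl_cons]
      exact ih _
    rw [h2, List.length_cons]
    ring

lemma valS_cons (c : Char) (rest : List Char) :
    valS (c :: rest) = pvCharIntB c * 10 ^ rest.length + valS rest := by
  have h2 : valS (c :: rest) = (10 * 0 + pvCharIntB c) * 10 ^ rest.length + valS rest := by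
    unfold valS
    rw [List.foldl_cons]
    exact valS_seed rest _
  rw [h2]
  ring

lemma dpPure_closed : ∀ (s : List Char), AllDig s →
    dpPure s false true = 10 ^ s.length ∧
    dpPure s false false = 10 ^ s.length - 9 ^ s.length ∧
    dpPure s true true = valS s + 1 ∧
    dpPure s true false = valS s + 1 - freeB s := by
  intro s
  induction s with
  | nil => intro _; simp [dpPure, valS, freeB]
  | cons c rest ih =>
    intro hd
    have hc := hd c List.mem_cons_self
    obtain ⟨ih1, ih2, ih3, ih4⟩ := ih (fun x hx => hd x (List.mem_cons_of_mem _ hx))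
    have h10 : PySem.List.pyRange 0 (9 + 1) 1 = [0,1,2,3,4,5,6,7,8,9] := by decide
    refine ⟨?_, ?_, ?_, ?_⟩
    · simp only [dpPure, Bool.false_eq_true, if_false, h10]
      simp [ih1]
      ring
    · simp only [dpPure, Bool.false_eq_true, if_false, h10]
      simp [ih1, ih2]
      ring
    · simp only [dpPure, if_true, valS_cons, List.length_cons]
      obtain ⟨hc0, hc9⟩ := hc
      generalize hcv : pvCharIntB c = cv at *
      have hcase : cv = 0 ∨ cv = 1 ∨ cv = 2 ∨ cv = 3 ∨ cv = 4 ∨ cv = 5 ∨ cv = 6 ∨ cv = 7 ∨ cv = 8 ∨ cv = 9 := by omega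
      rcases hcase with rfl|rfl|rfl|rfl|rfl|rfl|rfl|rfl|rfl|rfl
      · rw [show PySem.List.pyRange 0 (0+1) 1 = ([0] : List Int) from by decide]
        simp [ih1, ih2, ih3, ih4]
        try ring
        try omega
      · rw [show PySem.List.pyRange 0 (1+1) 1 = ([0,1] : List Int) from by decide]
        simp [ih1, ih2, ih3, ih4]
        try ring
        try omega
      · rw [show PySem.List.pyRange 0 (2+1) 1 = ([0,1,2] : List Int) from by decide]
        simp [ih1, ih2, ih3, ih4]
        try ring
        try omega
      · rw [show PySem.List.pyRange 0 (3+1) 1 = ([0,1,2,3] : List Int) from by decide]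
        simp [ih1, ih2, ih3, ih4]
        try ring
        try omega
      · rw [show PySem.List.pyRange 0 (4+1) 1 = ([0,1,2,3,4] : List Int) from by decide]
        simp [ih1, ih2, ih3, ih4]
        try ring
        try omega
      · rw [show PySem.List.pyRange 0 (5+1) 1 = ([0,1,2,3,4,5] : List Int) from by decide]
        simp [ih1, ih2, ih3, ih4]
        try ring
        try omega
      · rw [show PySem.List.pyRange 0 (6+1) 1 = ([0,1,2,3,4,5,6] : List Int) from by decide]
        simp [ih1, ih2, ih3, ih4]
        try ring
        try omega
      · rw [show PySem.List.pyRange 0 (7+1) 1 = ([0,1,2,3,4,5,6,7] : List Int) from by decide]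
        simp [ih1, ih2, ih3, ih4]
        try ring
        try omega
      · rw [show PySem.List.pyRange 0 (8+1) 1 = ([0,1,2,3,4,5,6,7,8] : List Int) from by decide]
        simp [ih1, ih2, ih3, ih4]
        try ring
        try omega
      · rw [show PySem.List.pyRange 0 (9+1) 1 = ([0,1,2,3,4,5,6,7,8,9] : List Int) from by decide]
        simp [ih1, ih2, ih3, ih4]
        try ring
        try omega
    · simp only [dpPure, if_true, valS_cons, List.length_cons, freeB]
      obtain ⟨hc0, hc9⟩ := hc
      generalize hcv : pvCharIntB c = cv at *
      have hcase : cv = 0 ∨ cv = 1 ∨ cv = 2 ∨ cv = 3 ∨ cv = 4 ∨ cv = 5 ∨ cv = 6 ∨ cv = 7 ∨ cv = 8 ∨ cv = 9 := by omega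
      rcases hcase with rfl|rfl|rfl|rfl|rfl|rfl|rfl|rfl|rfl|rfl
      · rw [show PySem.List.pyRange 0 (0+1) 1 = ([0] : List Int) from by decide]
        simp [ih1, ih2, ih3, ih4]
        try ring
        try omega
      · rw [show PySem.List.pyRange 0 (1+1) 1 = ([0,1] : List Int) from by decide]
        simp [ih1, ih2, ih3, ih4]
        try ring
        try omega
      · rw [show PySem.List.pyRange 0 (2+1) 1 = ([0,1,2] : List Int) from by decide]
        simp [ih1, ih2, ih3, ih4]
        try ring
        try omega
      · rw [show PySem.List.pyRange 0 (3+1) 1 = ([0,1,2,3] : List Int) from by decide]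
        simp [ih1, ih2, ih3, ih4]
        try ring
        try omega
      · rw [show PySem.List.pyRange 0 (4+1) 1 = ([0,1,2,3,4] : List Int) from by decide]
        simp [ih1, ih2, ih3, ih4]
        try ring
        try omega
      · rw [show PySem.List.pyRange 0 (5+1) 1 = ([0,1,2,3,4,5] : List Int) from by decide]
        simp [ih1, ih2, ih3, ih4]
        try ring
        try omega
      · rw [show PySem.List.pyRange 0 (6+1) 1 = ([0,1,2,3,4,5,6] : List Int) from by decide]
        simp [ih1, ih2, ih3, ih4]
        try ring
        try omega
      · rw [show PySem.List.pyRange 0 (7+1) 1 = ([0,1,2,3,4,5,6,7] : List Int) from by decide]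
        simp [ih1, ih2, ih3, ih4]
        try ring
        try omega
      · rw [show PySem.List.pyRange 0 (8+1) 1 = ([0,1,2,3,4,5,6,7,8] : List Int) from by decide]
        simp [ih1, ih2, ih3, ih4]
        try ring
        try omega
      · rw [show PySem.List.pyRange 0 (9+1) 1 = ([0,1,2,3,4,5,6,7,8,9] : List Int) from by decide]
        simp [ih1, ih2, ih3, ih4]
        try ring
        try omega

-- str(N) for N ≥ 0, as its own recursion (most significant digit first)
def Drec (n : Nat) : List Char :=
  if h : n < 10 then [Nat.digitChar n]
  else Drec (n / 10) ++ [Nat.digitChar (n % 10)]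
termination_by n
decreasing_by exact Nat.div_lt_self (by omega) (by omega)

lemma toDigitsCore_eq : ∀ (fuel n : Nat) (ds : List Char), n < fuel →
    Nat.toDigitsCore 10 fuel n ds = Drec n ++ ds := by
  intro fuel
  induction fuel with
  | zero => intro n ds h; omega
  | succ fuel ih =>
    intro n ds h
    simp only [Nat.toDigitsCore]
    by_cases h10 : n / 10 = 0
    · have hn : n < 10 := by omega
      rw [Drec]
      simp [h10, hn, Nat.mod_eq_of_lt hn]
    · have hn : ¬ n < 10 := by omega
      have hlt : n / 10 < n := Nat.div_lt_self (by omega) (by omega)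
      rw [Drec]
      simp only [hn, dite_false, h10, if_false]
      rw [ih (n / 10) (Nat.digitChar (n % 10) :: ds) (by omega)]
      simp

lemma toChars_eq (n : Nat) : PySem.Int.toChars (n : Int) = Drec n := by
  unfold PySem.Int.toChars
  rw [if_neg (by omega)]
  simp only [Int.toNat_natCast]
  unfold Nat.toDigits
  rw [toDigitsCore_eq (n + 1) n [] (by omega)]
  simp

lemma pvCharIntB_digitChar (x : Nat) (h : x < 10) :
    pvCharIntB (Nat.digitChar x) = (x : Int) := by
  interval_cases x <;> decide

lemma allDig_Drec (n : Nat) : AllDig (Drec n) := by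
  induction n using Nat.strong_induction_on with
  | _ n ih =>
    rw [Drec]
    split
    · next hn =>
      intro c hcm
      simp only [List.mem_singleton] at hcm
      subst hcm
      rw [pvCharIntB_digitChar n hn]
      constructor <;> [positivity; exact_mod_cast Nat.le_of_lt_succ (by omega)]
    · next hn =>
      intro c hcm
      rcases List.mem_append.1 hcm with h1 | h2
      · exact ih (n / 10) (Nat.div_lt_self (by omega) (by omega)) c h1
      · simp only [List.mem_singleton] at h2
        subst h2
        rw [pvCharIntB_digitChar (n % 10) (Nat.mod_lt _ (by omega))]
        have := Nat.mod_lt n (show 0 < 10 by omega)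
        constructor <;> [positivity; exact_mod_cast Nat.le_of_lt_succ (by omega)]

lemma valS_snoc (xs : List Char) (c : Char) :
    valS (xs ++ [c]) = 10 * valS xs + pvCharIntB c := by
  unfold valS
  rw [List.foldl_append]
  simp

lemma valS_Drec (n : Nat) : valS (Drec n) = (n : Int) := by
  induction n using Nat.strong_induction_on with
  | _ n ih =>
    rw [Drec]
    split
    · next hn =>
      show valS [Nat.digitChar n] = (n : Int)
      unfold valS
      simp [pvCharIntB_digitChar n hn]
    · next hn =>
      rw [valS_snoc, ih (n / 10) (Nat.div_lt_self (by omega) (by omega)),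
        pvCharIntB_digitChar (n % 10) (Nat.mod_lt _ (by omega))]
      push_cast
      omega

-- ===== VERDICT (by name: the statement is the Claim_ definition above) =====
theorem count_with4_upto_spec : Claim_equal_count_with4_upto := by
  intro N _
  unfold Spec_count_with4_upto count_with4_upto count_with4_upto_alt
  by_cases hN : N < 0
  · simp [hN]
  · simp only [hN, if_false]
    have hNn : ((N.toNat : Nat) : Int) = N := Int.toNat_of_nonneg (by omega)
    have hs : (PySem.Int.toStr N).toList = Drec N.toNat := by
      rw [PySem.Int.toList_toStr, ← hNn, toChars_eq, Int.toNat_natCast]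
    rw [hs]
    have hmain := dpA_correct (Drec N.toNat) (Drec N.toNat).length 0 true false
      PySem.Dict.empty (by intro p t h v hv; simp [PySem.Dict.get?_empty] at hv)
      le_rfl (by exact_mod_cast Nat.zero_le _) (by simp)
    have hclosed := (dpPure_closed (Drec N.toNat) (allDig_Drec N.toNat)).2.2.2
    rw [hmain.1]
    simp only [Int.toNat_zero, List.drop_zero]
    rw [hclosed, valS_Drec, hNn]
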